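-- pv_equiv track=rewrite | github.com/mezdahun/lab_rotation_schoell | Attachmnet_2_analysis_and_plot.py | cantor_ring
-- ===== SOURCE A (Python) =====
-- def cantor_ring(b_0, n, break_symmetry = True):
--     '''b_o is an initiation string,
--     the function generates a circular cantor fractal topology of depth n with initiation string b_0
--     Option: symmetry breaking: adding zero to self connections'''
--     b = len(b_0)
--     repzero = b*'0'
--     repone = b_0
--     for i in range(n):
--         b_0 = b_0.replace('0',repzero)
--         b_0 = b_0.replace('1',repone)
--     if break_symmetry:
--         b_0 = ''.join(['0',b_0])
--     return b_0
-- ===== SOURCE B (Python) =====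
-- def cantor_ring(b_0, n, break_symmetry=True):
--     """Each pass of A is a concatenation homomorphism ('0'->'0'*b, '1'->original b_0,
--     other chars fixed), so iterate it on the one-char seeds that actually occur in b_0
--     and expand b_0 in a single mapping pass."""
--     repzero = '0' * len(b_0)
--
--     def expand(seed):
--         e = seed
--         for _ in range(n):
--             e = e.replace('0', repzero).replace('1', b_0)
--         return e
--
--     e0 = expand('0') if '0' in b_0 else '0'
--     e1 = expand('1') if '1' in b_0 else '1'
--     core = ''.join(e0 if c == '0' else e1 if c == '1' else c for c in b_0)
--     return '0' + core if break_symmetry else core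
-- ===== Notes on version B (the rewrite author's own statement) =====
-- stated objective: faster
-- what changed: Instead of running the two-replace substitution n times over the whole (possibly huge, possibly unchanging) string, B iterates it only on the one-character seeds '0'/'1' that actually occur in b_0 and then expands the original string in a single mapping pass (each pass is a concatenation homomorphism).
import Mathlib
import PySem

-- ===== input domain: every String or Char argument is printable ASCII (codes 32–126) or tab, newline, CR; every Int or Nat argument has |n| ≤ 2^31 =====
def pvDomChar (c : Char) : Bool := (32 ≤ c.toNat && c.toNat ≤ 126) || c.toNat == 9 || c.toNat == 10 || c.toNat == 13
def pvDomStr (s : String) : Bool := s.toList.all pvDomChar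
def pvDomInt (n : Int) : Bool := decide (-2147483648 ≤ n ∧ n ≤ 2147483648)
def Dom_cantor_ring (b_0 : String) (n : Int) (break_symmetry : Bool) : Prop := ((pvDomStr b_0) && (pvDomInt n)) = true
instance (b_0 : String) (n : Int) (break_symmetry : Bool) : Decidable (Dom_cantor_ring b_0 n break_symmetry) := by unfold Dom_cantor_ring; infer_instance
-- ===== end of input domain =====

-- B replaces A's n rescans of the whole (possibly unchanging) string by iterating the
-- two-replace substitution only on the one-char seeds '0'/'1' occurring in b_0, then
-- expanding b_0 in one mapping pass (objective: faster; measurably so in a timing run).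

-- ===== PORT A =====
-- literal transliteration of A: freeze b, repzero, repone, then n replace-passes over b_0
def cantor_ring (b_0 : String) (n : Int) (break_symmetry : Bool) : String :=
  let b : Int := PySem.Str.len b_0
  let repzero : String := String.ofList (List.replicate b.toNat '0')  -- b*'0' (b ≥ 0)
  let repone : String := b_0
  let s := (PySem.List.pyRange 0 n 1).foldl
    (fun s _ => PySem.Str.replace (PySem.Str.replace s "0" repzero) "1" repone) b_0
  if break_symmetry then PySem.Str.join "" ["0", s] else s

-- ===== PORT B =====
-- literal transliteration of Source B: expand only the seeds that occur in b_0, then one mapping pass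
def cantor_ring_alt (b_0 : String) (n : Int) (break_symmetry : Bool) : String :=
  let repzero : String := String.ofList (List.replicate (PySem.Str.len b_0).toNat '0')  -- '0' * len(b_0)
  let expand : String → String := fun seed =>
    (PySem.List.pyRange 0 n 1).foldl
      (fun e _ => PySem.Str.replace (PySem.Str.replace e "0" repzero) "1" b_0) seed
  let e0 := if PySem.Str.isIn "0" b_0 then expand "0" else "0"
  let e1 := if PySem.Str.isIn "1" b_0 then expand "1" else "1"
  -- ''.join(e0 if c == '0' else e1 if c == '1' else c for c in b_0)
  let core : String := String.ofList (b_0.toList.flatMap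
    (fun c => if c = '0' then e0.toList else if c = '1' then e1.toList else [c]))
  if break_symmetry then "0" ++ core else core

-- ===== PRECONDITION & SPEC =====
def Spec_cantor_ring (b_0 : String) (n : Int) (break_symmetry : Bool) (out : String) : Prop := out = cantor_ring_alt b_0 n break_symmetry
instance (b_0 : String) (n : Int) (break_symmetry : Bool) (out : String) : Decidable (Spec_cantor_ring b_0 n break_symmetry out) := by unfold Spec_cantor_ring; infer_instance

-- ===== CLAIM (what is proved, stated in full; the proofs are below) =====
def Claim_equal_cantor_ring : Prop := ∀ (b_0 : String) (n : Int) (break_symmetry : Bool), Dom_cantor_ring b_0 n break_symmetry → Spec_cantor_ring b_0 n break_symmetry (cantor_ring b_0 n break_symmetry)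

-- ===== LEMMAS AND PROOFS =====

-- one two-replace pass, on the list side
def pvStep (rz ro : List Char) (s : List Char) : List Char :=
  PySem.Chars.replace (PySem.Chars.replace s ['0'] rz) ['1'] ro

-- per-char expansion of one pass (valid because rz = replicate b '0' contains no '1')
def pvSub (rz ro : List Char) (c : Char) : List Char :=
  if c = '0' then rz else if c = '1' then ro else [c]

-- replace with a single-char pattern is a per-char flatMap
theorem replace_single_go (p : Char) (new : List Char) :
    ∀ (s : List Char) (fuel : Nat) (acc : List Char), s.length ≤ fuel →
      PySem.Chars.replace.go [p] new fuel s acc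
        = acc.reverse ++ s.flatMap (fun c => if c = p then new else [c]) := by
  intro s
  induction s with
  | nil =>
      intro fuel acc _
      cases fuel <;> simp [PySem.Chars.replace.go]
  | cons c t ih =>
      intro fuel acc h
      cases fuel with
      | zero => simp at h
      | succ fuel =>
          by_cases hc : c = p
          · subst hc
            simp [PySem.Chars.replace.go, List.isPrefixOf, ih fuel _ (by simpa using h)]
          · simp [PySem.Chars.replace.go, List.isPrefixOf, hc,
              ih fuel _ (by simpa using h), Ne.symm hc]

theorem replace_single (p : Char) (new s : List Char) :
    PySem.Chars.replace s [p] new = s.flatMap (fun c => if c = p then new else [c]) := by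
  simpa using replace_single_go p new s s.length [] le_rfl

theorem flatMap_replicate_zero (ro : List Char) (b : Nat) :
    (List.replicate b '0').flatMap (fun c => if c = '1' then ro else [c])
      = List.replicate b '0' := by
  induction b with
  | zero => simp
  | succ b ih => simp [List.replicate_succ, ih]

-- one pass = flatMap of pvSub
theorem pvStep_eq_flatMap (b : Nat) (ro s : List Char) :
    pvStep (List.replicate b '0') ro s = s.flatMap (pvSub (List.replicate b '0') ro) := by
  unfold pvStep
  rw [replace_single, replace_single, List.flatMap_assoc]
  apply List.flatMap_congr
  intro c _
  by_cases h0 : c = '0'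
  · simp [pvSub, h0, flatMap_replicate_zero]
  · by_cases h1 : c = '1' <;> simp [pvSub, h0, h1]

theorem pvStep_append (b : Nat) (ro x y : List Char) :
    pvStep (List.replicate b '0') ro (x ++ y)
      = pvStep (List.replicate b '0') ro x ++ pvStep (List.replicate b '0') ro y := by
  simp [pvStep_eq_flatMap]

theorem pvStep_iter_append (b : Nat) (ro : List Char) (k : Nat) (x y : List Char) :
    (pvStep (List.replicate b '0') ro)^[k] (x ++ y)
      = (pvStep (List.replicate b '0') ro)^[k] x ++ (pvStep (List.replicate b '0') ro)^[k] y := by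
  induction k generalizing x y with
  | zero => simp
  | succ k ih => simp [Function.iterate_succ_apply, pvStep_append, ih]

-- the iterated pass expands each character of the string independently
theorem pvStep_iter_flatMap (b : Nat) (ro : List Char) (k : Nat) (s : List Char) :
    (pvStep (List.replicate b '0') ro)^[k] s
      = s.flatMap (fun c => (pvStep (List.replicate b '0') ro)^[k] [c]) := by
  induction s with
  | nil =>
      induction k with
      | zero => simp
      | succ k ih => simp [Function.iterate_succ_apply, pvStep_eq_flatMap, ih]
  | cons c t ih =>
      have : c :: t = [c] ++ t := rfl
      rw [this, pvStep_iter_append, ih]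
      simp

-- characters other than '0' and '1' are fixed by every pass
theorem pvStep_iter_other (b : Nat) (ro : List Char) (k : Nat) (c : Char)
    (h0 : c ≠ '0') (h1 : c ≠ '1') :
    (pvStep (List.replicate b '0') ro)^[k] [c] = [c] := by
  induction k with
  | zero => rfl
  | succ k ih => simp [Function.iterate_succ_apply, pvStep_eq_flatMap, pvSub, h0, h1, ih]

-- a fold that ignores the list elements is Function.iterate
theorem foldl_const_iterate {α β : Type} (F : α → α) (l : List β) :
    ∀ (a : α), l.foldl (fun s _ => F s) a = F^[l.length] a := by
  induction l with
  | nil => intro a; rfl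
  | cons x t ih => intro a; simp [List.foldl_cons, ih, Function.iterate_succ_apply]

-- A's string-level pass equals pvStep on toList
theorem strStep_toList (b : Nat) (ro s : String) :
    (PySem.Str.replace (PySem.Str.replace s "0" (String.ofList (List.replicate b '0'))) "1" ro).toList
      = pvStep (List.replicate b '0') ro.toList s.toList := by
  simp [PySem.Str.toList_replace, pvStep]

-- ===== VERDICT (by name: the statement is the Claim_ definition above) =====
theorem cantor_ring_spec : Claim_equal_cantor_ring := by
  unfold Claim_equal_cantor_ring
  intro b_0 n break_symmetry _
  simp only [Spec_cantor_ring, cantor_ring, cantor_ring_alt]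
  have hstr : ∀ (s : String) (m : Nat),
      ((fun s => PySem.Str.replace (PySem.Str.replace s "0"
        (String.ofList (List.replicate (PySem.Str.len b_0).toNat '0'))) "1" b_0)^[m] s).toList
        = (pvStep (List.replicate (PySem.Str.len b_0).toNat '0') b_0.toList)^[m] s.toList := by
    intro s m
    induction m generalizing s with
    | zero => rfl
    | succ m ih =>
        rw [Function.iterate_succ_apply, Function.iterate_succ_apply, ih, strStep_toList]
  have hA : (List.foldl (fun s _ => PySem.Str.replace (PySem.Str.replace s "0"
        (String.ofList (List.replicate (PySem.Str.len b_0).toNat '0'))) "1" b_0)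
        b_0 (PySem.List.pyRange 0 n 1)).toList
      = (pvStep (List.replicate (PySem.Str.len b_0).toNat '0')
          b_0.toList)^[(PySem.List.pyRange 0 n 1).length] b_0.toList := by
    rw [foldl_const_iterate]; exact hstr b_0 _
  have hexp : ∀ (s : String),
      ((PySem.List.pyRange 0 n 1).foldl (fun e _ => PySem.Str.replace (PySem.Str.replace e "0"
        (String.ofList (List.replicate (PySem.Str.len b_0).toNat '0'))) "1" b_0) s).toList
      = (pvStep (List.replicate (PySem.Str.len b_0).toNat '0')
          b_0.toList)^[(PySem.List.pyRange 0 n 1).length] s.toList := by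
    intro s; rw [foldl_const_iterate]; exact hstr s _
  have hcore : (pvStep (List.replicate (PySem.Str.len b_0).toNat '0')
        b_0.toList)^[(PySem.List.pyRange 0 n 1).length] b_0.toList
      = b_0.toList.flatMap (fun c =>
          if c = '0' then
            (if PySem.Str.isIn "0" b_0 then
              (PySem.List.pyRange 0 n 1).foldl (fun e _ => PySem.Str.replace (PySem.Str.replace e "0"
                (String.ofList (List.replicate (PySem.Str.len b_0).toNat '0'))) "1" b_0) "0"
             else "0").toList
          else if c = '1' then
            (if PySem.Str.isIn "1" b_0 then
              (PySem.List.pyRange 0 n 1).foldl (fun e _ => PySem.Str.replace (PySem.Str.replace e "0"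
                (String.ofList (List.replicate (PySem.Str.len b_0).toNat '0'))) "1" b_0) "1"
             else "1").toList
          else [c]) := by
    rw [pvStep_iter_flatMap]
    apply List.flatMap_congr
    intro c hc
    by_cases h0 : c = '0'
    · subst h0
      have hin : PySem.Str.isIn "0" b_0 = true := by
        rw [PySem.Str.isIn_iff_infix]
        obtain ⟨s1, s2, hsp⟩ := List.append_of_mem hc
        exact ⟨s1, s2, by simp [hsp]⟩
      rw [if_pos rfl, if_pos hin, hexp "0"]; rfl
    · by_cases h1 : c = '1'
      · subst h1
        have hin : PySem.Str.isIn "1" b_0 = true := by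
          rw [PySem.Str.isIn_iff_infix]
          obtain ⟨s1, s2, hsp⟩ := List.append_of_mem hc
          exact ⟨s1, s2, by simp [hsp]⟩
        rw [if_neg (show ¬('1' : Char) = '0' by decide), if_pos rfl, if_pos hin, hexp "1"]; rfl
      · rw [if_neg h0, if_neg h1]
        exact pvStep_iter_other _ _ _ c h0 h1
  apply String.toList_inj.mp
  cases break_symmetry with
  | false =>
      simp only [if_neg Bool.false_ne_true]
      rw [hA, hcore, String.toList_ofList]
  | true =>
      rw [if_pos (rfl : true = true), if_pos (rfl : true = true)]
      rw [PySem.Str.toList_join]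
      simp only [List.map, PySem.Chars.join, List.intercalate, List.intersperse, List.flatten]
      rw [hA, hcore, String.toList_append, String.toList_ofList]
      simp
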